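-- pv_equiv track=rewrite | github.com/mk1-p/coding-test | PythonCode/programmers/entry_screening.py | solution
-- ===== SOURCE A (Python) =====
-- def solution(n, times):
--     a,b = 0,1
--     while not is_ok(n, times, b):
--         a,b = b, 2*b
--     while a<b:
--         m = (a+b)//2
--         a,b = (a,m) if is_ok(n, times, m) else (m+1,b)
--     return a
--
-- def is_ok(n, times, x):
--     return n <= sum(x//i for i in times)
-- ===== SOURCE B (Python) =====
-- def solution(n, times):
--     # Event simulation: serve applicants in order of finishing time, batching
--     # all examiners that share the same screening time.  No feasibility
--     # predicate and no binary search: the answer is the time at which the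
--     # cumulative number of screened applicants first reaches n.
--     cnt = {}
--     for t in times:
--         cnt[t] = cnt.get(t, 0) + 1
--     nxt = {t: t for t in cnt}          # next finishing time per distinct time
--     ans, served = 0, 0
--     while served < n:
--         t = min(nxt, key=nxt.get)      # group finishing earliest
--         ans = nxt[t]
--         served += cnt[t]               # all examiners with time t finish at once
--         nxt[t] = ans + t
--     return ans
-- ===== Notes on version B (the rewrite author's own statement) =====
-- stated objective: alternative
-- what changed: Replaced A's feasibility-predicate search (exponential doubling to bracket the answer, then binary search on n <= sum(x//t)) by a direct event simulation: count examiners per distinct screening time, then repeatedly pop the smallest next finishing time, batch-serving all examiners sharing that time, until n applicants are screened; the last popped time is the answer.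
-- outside the precondition, e.g. on solution(9, [2, -4]): A returns 36, B returns -36; on solution(3, []): A does not finish within the time limit, B raises ValueError
import Mathlib
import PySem

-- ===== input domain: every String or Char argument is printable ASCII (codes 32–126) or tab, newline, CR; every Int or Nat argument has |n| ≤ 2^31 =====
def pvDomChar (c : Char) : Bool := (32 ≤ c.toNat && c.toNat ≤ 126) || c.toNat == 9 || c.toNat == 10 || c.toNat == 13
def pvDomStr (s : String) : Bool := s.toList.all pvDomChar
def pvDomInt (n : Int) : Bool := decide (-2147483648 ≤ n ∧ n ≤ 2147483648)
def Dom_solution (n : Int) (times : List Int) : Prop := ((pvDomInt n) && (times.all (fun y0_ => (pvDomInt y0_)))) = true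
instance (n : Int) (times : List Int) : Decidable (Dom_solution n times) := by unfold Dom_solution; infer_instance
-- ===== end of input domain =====

-- B replaces A's feasibility-predicate search (exponential doubling, then binary search on
-- n <= sum(x//t)) by a direct event simulation: count examiners per distinct screening time and
-- repeatedly pop the smallest next finishing time, batch-serving all examiners that share it,
-- until n applicants are screened; equivalence of return values is proved on positive times.

-- ===== PORT A =====
-- is_ok(n, times, x) = n <= sum(x//i for i in times)
def isOk (n : Int) (times : List Int) (x : Int) : Bool :=
  decide (n ≤ (times.map (fun i => PySem.Int.floordiv x i)).sum)

-- A's first loop: while not is_ok(n,times,b): a,b = b, 2*b.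
-- Fuel only makes the loop total; 100 iterations always suffice on Dom ∧ Pre (lemma doubleA_spec).
def doubleA (n : Int) (times : List Int) : Nat → Int → Int → Int × Int
  | 0, a, b => (a, b)
  | f + 1, a, b => if isOk n times b then (a, b) else doubleA n times f b (2 * b)

-- A's second loop: while a<b: m=(a+b)//2; a,b = (a,m) if is_ok(...) else (m+1,b); return a.
-- Fuel only makes the loop total; 200 iterations always suffice on Dom ∧ Pre (lemma searchA_spec).
def searchA (n : Int) (times : List Int) : Nat → Int → Int → Int
  | 0, a, _ => a
  | f + 1, a, b =>
    if a < b then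
      if isOk n times (PySem.Int.floordiv (a + b) 2) then
        searchA n times f a (PySem.Int.floordiv (a + b) 2)
      else
        searchA n times f (PySem.Int.floordiv (a + b) 2 + 1) b
    else a

def solution (n : Int) (times : List Int) : Int :=
  let p := doubleA n times 100 0 1
  searchA n times 200 p.1 p.2

-- ===== PORT B =====
-- B's loop 'while served < n': pop the first key with minimal next finishing time
-- (min(nxt, key=nxt.get) compares the stored values, so it is the first item of minimal value),
-- record it as ans, serve cnt[t] applicants, push the next multiple.
-- Fuel only makes the loop total; n.toNat+1 iterations always suffice since every pop serves
-- at least one applicant (lemma simB_spec).  On an empty dict Python's min raises ValueError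
-- (outside Pre_); the port returns the accumulator there.
def simB (cnt : PySem.Dict Int Int) (n : Int) : Nat → PySem.Dict Int Int → Int → Int → Int
  | 0, _, _, ans => ans
  | f + 1, nxt, served, ans =>
    if served < n then
      match PySem.List.min? nxt.items (fun p => p.2) with
      | some (t, v) => simB cnt n f (nxt.insert t (v + t)) (served + cnt.getD t 0) v
      | none => ans
    else ans

def solution_alt (n : Int) (times : List Int) : Int :=
  let cnt := times.foldl (fun d t => d.insert t (d.getD t 0 + 1)) PySem.Dict.empty
  let nxt := cnt.keys.foldl (fun d t => d.insert t t) PySem.Dict.empty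
  simB cnt n (n.toNat + 1) nxt 0 0

-- ===== PRECONDITION & SPEC =====
-- Pre_ excludes lists with a non-positive time — A raises ZeroDivisionError on a 0 entry, and on
-- negative entries returns floor-division accidents (36 for (9,[2,-4])) or diverges, neither a
-- specifiable 'time per screening' — and empty times with n > 0, where A diverges and B's
-- min({}) raises ValueError; it keeps the degenerate corner n ≤ -len(times) without a 0 entry,
-- where A's first feasibility test succeeds at once and both programs return 0.
def Pre_solution (n : Int) (times : List Int) : Prop :=
  ((∀ t ∈ times, 0 < t) ∧ (times = [] → n ≤ 0)) ∨
  ((∀ t ∈ times, t ≠ 0) ∧ n ≤ -(times.length : Int))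
instance (n : Int) (times : List Int) : Decidable (Pre_solution n times) := by
  unfold Pre_solution; infer_instance

def pvWitness_solution : Int × List Int := (6, [7, 10])

def Spec_solution (n : Int) (times : List Int) (out : Int) : Prop := out = solution_alt n times
instance (n : Int) (times : List Int) (out : Int) : Decidable (Spec_solution n times out) := by
  unfold Spec_solution; infer_instance

-- ===== CLAIM (what is proved, stated in full; the proofs are below) =====
def Claim_equal_solution : Prop := ∀ (n : Int) (times : List Int), Dom_solution n times → Pre_solution n times → Spec_solution n times (solution n times)

-- ===== LEMMAS AND PROOFS =====

-- total screened applicants at time x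
def pvS (times : List Int) (x : Int) : Int :=
  (times.map (fun i => PySem.Int.floordiv x i)).sum

theorem pvS_mono (times : List Int) (hpos : ∀ t ∈ times, 0 < t)
    {x y : Int} (hxy : x ≤ y) : pvS times x ≤ pvS times y := by
  induction times with
  | nil => simp [pvS]
  | cons t ts ih =>
    have ht : 0 < t := hpos t (by simp)
    have h1 : PySem.Int.floordiv x t ≤ PySem.Int.floordiv y t := by
      rw [PySem.Int.floordiv_eq_ediv_of_pos ht, PySem.Int.floordiv_eq_ediv_of_pos ht]
      exact Int.ediv_le_ediv ht hxy
    have h2 := ih (fun u hu => hpos u (by simp [hu]))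
    simp only [pvS, List.map_cons, List.sum_cons] at *
    omega

theorem floordiv_zero_eq (t : Int) (ht : t ≠ 0) : PySem.Int.floordiv 0 t = 0 := by
  rcases lt_or_gt_of_ne ht with h | h
  · have h1 := PySem.Int.floordiv_mul_add_mod 0 t
    have h2 := PySem.Int.mod_neg_bounds (a := 0) h
    set q := PySem.Int.floordiv 0 t with hq
    rcases lt_trichotomy q 0 with hc | hc | hc
    · exfalso
      have h6 : 0 ≤ (-t) * (-(q + 1)) :=
        mul_nonneg (by omega : (0:Int) ≤ -t) (by omega : (0:Int) ≤ -(q + 1))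
      nlinarith
    · exact hc
    · exfalso
      have h6 : 0 ≤ (-t) * (q - 1) :=
        mul_nonneg (by omega : (0:Int) ≤ -t) (by omega : (0:Int) ≤ q - 1)
      nlinarith
  · rw [PySem.Int.floordiv_eq_ediv_of_pos h]
    exact Int.zero_ediv t

theorem pvS_zero (times : List Int) (hnz : ∀ t ∈ times, t ≠ 0) : pvS times 0 = 0 := by
  induction times with
  | nil => simp [pvS]
  | cons t ts ih =>
    have h0 : PySem.Int.floordiv 0 t = 0 := floordiv_zero_eq t (hnz t (by simp))
    simp only [pvS, List.map_cons, List.sum_cons] at *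
    rw [h0, ih (fun u hu => hnz u (by simp [hu]))]; omega

-- for t ≠ 0, Python's 1//t is at least -1
theorem floordiv_one_ge (t : Int) (ht : t ≠ 0) : -1 ≤ PySem.Int.floordiv 1 t := by
  rcases lt_or_gt_of_ne ht with h | h
  · have h1 := PySem.Int.floordiv_mul_add_mod 1 t
    have h2 := PySem.Int.mod_neg_bounds (a := 1) h
    set q := PySem.Int.floordiv 1 t with hq
    by_contra hcon
    push Not at hcon
    have h3 : (1:Int) * 1 ≤ (-t) * (-(q + 1)) :=
      mul_le_mul (by omega) (by omega) (by omega) (by omega)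
    nlinarith
  · have := (PySem.Int.le_floordiv_iff_mul_le (q := 0) (a := 1) h).mpr (by omega)
    omega

-- each 1//t contributes at least -1 to A's first feasibility sum
theorem sum_floordiv_one_ge (times : List Int) (hnz : ∀ t ∈ times, t ≠ 0) :
    -(times.length : Int) ≤ (times.map (fun i => PySem.Int.floordiv 1 i)).sum := by
  induction times with
  | nil => simp
  | cons a l ih =>
    have h1 := floordiv_one_ge a (hnz a (by simp))
    have h2 := ih (fun u hu => hnz u (by simp [hu]))
    simp only [List.map_cons, List.sum_cons, List.length_cons]
    push_cast
    omega

theorem pvS_ge_mem (times : List Int) (hpos : ∀ t ∈ times, 0 < t)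
    {m x : Int} (hm : m ∈ times) (hx : 0 ≤ x) :
    PySem.Int.floordiv x m ≤ pvS times x := by
  induction times with
  | nil => simp at hm
  | cons t ts ih =>
    have hnn : ∀ u ∈ t :: ts, 0 ≤ PySem.Int.floordiv x u := by
      intro u hu
      have hu' : 0 < u := hpos u hu
      rw [PySem.Int.floordiv_eq_ediv_of_pos hu']
      exact Int.ediv_nonneg hx (le_of_lt hu')
    have hts : 0 ≤ pvS ts x := by
      have : ∀ u ∈ ts, 0 ≤ PySem.Int.floordiv x u := fun u hu => hnn u (by simp [hu])
      clear ih hm hnn hpos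
      induction ts with
      | nil => simp [pvS]
      | cons v vs ihv =>
        have hv := this v (by simp)
        have := ihv (fun u hu => this u (by simp [hu]))
        simp only [pvS, List.map_cons, List.sum_cons] at *
        omega
    rcases List.mem_cons.mp hm with h | h
    · subst h
      simp only [pvS, List.map_cons, List.sum_cons] at hts ⊢
      omega
    · have h1 := ih (fun u hu => hpos u (by simp [hu])) h
      have h2 := hnn t (by simp)
      simp only [pvS, List.map_cons, List.sum_cons] at h1 ⊢
      omega

-- characterization of A's binary-search loop: least feasible point in [a,b]
theorem searchA_spec (n : Int) (times : List Int) (hpos : ∀ t ∈ times, 0 < t) :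
    ∀ (f : Nat) (a b : Int), b - a < 2 ^ f → a ≤ b → n ≤ pvS times b →
      a ≤ searchA n times f a b ∧ searchA n times f a b ≤ b ∧
      n ≤ pvS times (searchA n times f a b) ∧
      (∀ y, a ≤ y → y < searchA n times f a b → ¬ n ≤ pvS times y) := by
  intro f
  induction f with
  | zero =>
    intro a b hf hab hb
    have hba : a = b := by simp at hf; omega
    subst hba
    simp only [searchA]
    exact ⟨le_refl a, le_refl a, hb, fun y h1 h2 => by omega⟩
  | succ f ih =>
    intro a b hf hab hb
    have h2f : (2:Int) ^ (f + 1) = 2 * 2 ^ f := by ring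
    have h2fpos : (0:Int) < 2 ^ f := by positivity
    simp only [searchA]
    by_cases hlt : a < b
    · have hmid := PySem.Int.floordiv_eq_ediv_of_pos (a := a + b) (show (0:Int) < 2 by omega)
      rw [if_pos hlt, hmid]
      by_cases hok : isOk n times ((a + b) / 2)
      · have hok' : n ≤ pvS times ((a + b) / 2) := by
          simpa [isOk, pvS] using hok
        rw [if_pos hok]
        obtain ⟨t1, t2, t3, t4⟩ := ih a ((a + b) / 2) (by omega) (by omega) hok'
        exact ⟨t1, by omega, t3, t4⟩
      · have hok' : ¬ n ≤ pvS times ((a + b) / 2) := by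
          simpa [isOk, pvS] using hok
        rw [if_neg hok]
        obtain ⟨t1, t2, t3, t4⟩ := ih ((a + b) / 2 + 1) b (by omega) (by omega) hb
        refine ⟨by omega, t2, t3, ?_⟩
        intro y h1 h2
        by_cases hym : y ≤ (a + b) / 2
        · intro hy
          exact hok' (le_trans hy (pvS_mono times hpos hym))
        · exact t4 y (by omega) h2
    · rw [if_neg hlt]
      have hba : a = b := by omega
      subst hba
      exact ⟨le_refl a, le_refl a, hb, fun y h1 h2 => by omega⟩

-- the doubling phase establishes: feasible b ≤ 2^f·b₀, and everything below a infeasible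
theorem doubleA_spec (n : Int) (times : List Int) (hpos : ∀ t ∈ times, 0 < t) :
    ∀ (f : Nat) (a b : Int), 0 ≤ a → a ≤ b → 0 < b →
      n ≤ pvS times (2 ^ f * b) →
      (∀ y, 0 ≤ y → y < a → ¬ n ≤ pvS times y) →
      0 ≤ (doubleA n times f a b).1 ∧
      (doubleA n times f a b).1 ≤ (doubleA n times f a b).2 ∧
      (doubleA n times f a b).2 ≤ 2 ^ f * b ∧
      n ≤ pvS times (doubleA n times f a b).2 ∧
      (∀ y, 0 ≤ y → y < (doubleA n times f a b).1 → ¬ n ≤ pvS times y) := by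
  intro f
  induction f with
  | zero =>
    intro a b ha hab hb hP hinv
    simp only [doubleA]
    exact ⟨ha, hab, by omega, by simpa using hP, hinv⟩
  | succ f ih =>
    intro a b ha hab hb hP hinv
    have h2fpos : (0:Int) < 2 ^ f := by positivity
    have h2f : (2:Int) ^ (f + 1) * b = 2 ^ f * (2 * b) := by ring
    simp only [doubleA]
    by_cases hok : isOk n times b
    · have hok' : n ≤ pvS times b := by simpa [isOk, pvS] using hok
      simp only [hok, if_true]
      refine ⟨ha, hab, ?_, hok', hinv⟩
      nlinarith
    · have hok' : ¬ n ≤ pvS times b := by simpa [isOk, pvS] using hok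
      simp only [hok, if_false, Bool.false_eq_true]
      have hP' : n ≤ pvS times (2 ^ f * (2 * b)) := by rw [← h2f]; exact hP
      have hinv' : ∀ y, 0 ≤ y → y < b → ¬ n ≤ pvS times y := by
        intro y h1 h2 hy
        exact hok' (le_trans hy (pvS_mono times hpos (by omega)))
      obtain ⟨t1, t2, t3, t4, t5⟩ := ih b (2 * b) (by omega) (by omega) (by omega) hP' hinv'
      exact ⟨t1, t2, by omega, t4, t5⟩

-- least feasible points are unique
theorem least_unique (n : Int) (times : List Int) {c1 c2 : Int}
    (h1 : 0 ≤ c1 ∧ n ≤ pvS times c1 ∧ ∀ y, 0 ≤ y → y < c1 → ¬ n ≤ pvS times y)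
    (h2 : 0 ≤ c2 ∧ n ≤ pvS times c2 ∧ ∀ y, 0 ≤ y → y < c2 → ¬ n ≤ pvS times y) :
    c1 = c2 := by
  by_contra hne
  rcases lt_or_gt_of_ne hne with h | h
  · exact h2.2.2 c1 h1.1 h h1.2.1
  · exact h1.2.2 c2 h2.1 h h2.2.1

-- adding 1 exactly at the positions equal to t adds count t to a mapped sum
theorem sum_map_split (l : List Int) (f g : Int → Int) (t : Int)
    (h : ∀ x ∈ l, g x = f x + (if x = t then 1 else 0)) :
    (l.map g).sum = (l.map f).sum + (l.count t : Int) := by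
  induction l with
  | nil => simp
  | cons a l ih =>
    have ha := h a (by simp)
    have ih' := ih (fun x hx => h x (by simp [hx]))
    simp only [List.map_cons, List.sum_cons, ha, ih', List.count_cons]
    push_cast
    by_cases hat : a = t
    · simp only [hat, beq_self_eq_true, if_true]; ring
    · have hbt : ¬ ((a == t) = true) := by simpa using hat
      simp only [if_neg hat, if_neg hbt]; ring

-- a sum of per-time served counts is at most the applicants screened by time ans
theorem served_le_pvS (times : List Int) (hpos : ∀ t ∈ times, 0 < t)
    (nxt : PySem.Dict Int Int) (ans : Int)
    (hkeys : nxt.keys = PySem.Set.ofList times) (hnd : nxt.keys.Nodup)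
    (hitems : ∀ p ∈ nxt.items, ∃ k : Int, 1 ≤ k ∧ p.2 = k * p.1 ∧ (k - 1) * p.1 ≤ ans ∧ ans ≤ k * p.1) :
    (times.map (fun t => PySem.Int.floordiv (nxt.getD t 0) t - 1)).sum ≤ pvS times ans := by
  unfold pvS
  apply List.sum_le_sum
  intro x hx
  have hxpos : 0 < x := hpos x hx
  have hxk : x ∈ nxt.keys := by rw [hkeys]; exact (PySem.Set.mem_ofList times x).mpr hx
  obtain ⟨p, hp, hpx⟩ : ∃ p ∈ nxt.items, p.1 = x := by
    simpa [PySem.Dict.keys, List.mem_map] using hxk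
  obtain ⟨k, hk1, hkv, hl, hr⟩ := hitems p hp
  have hgetD : nxt.getD x 0 = p.2 := by
    have hmem : (x, p.2) ∈ nxt.items := by rw [← hpx]; exact hp
    exact PySem.Dict.getD_of_mem_items nxt hmem hnd 0
  rw [hpx] at hkv hl
  have hdiv : PySem.Int.floordiv (k * x) x = k := by
    rw [PySem.Int.floordiv_eq_ediv_of_pos hxpos]
    exact Int.mul_ediv_cancel k (ne_of_gt hxpos)
  rw [hgetD, hkv, hdiv]
  have := (PySem.Int.le_floordiv_iff_mul_le (q := k - 1) (a := ans) hxpos).mpr hl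
  omega

-- any time strictly below the current minimum next finishing time screens at most 'served'
theorem pvS_le_served (times : List Int) (hpos : ∀ t ∈ times, 0 < t)
    (nxt : PySem.Dict Int Int) (y v : Int)
    (hkeys : nxt.keys = PySem.Set.ofList times) (hnd : nxt.keys.Nodup)
    (hitems : ∀ p ∈ nxt.items, ∃ k : Int, 1 ≤ k ∧ p.2 = k * p.1)
    (hmin : ∀ p ∈ nxt.items, v ≤ p.2) (hy : y < v) :
    pvS times y ≤ (times.map (fun t => PySem.Int.floordiv (nxt.getD t 0) t - 1)).sum := by
  unfold pvS
  apply List.sum_le_sum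
  intro x hx
  have hxpos : 0 < x := hpos x hx
  have hxk : x ∈ nxt.keys := by rw [hkeys]; exact (PySem.Set.mem_ofList times x).mpr hx
  obtain ⟨p, hp, hpx⟩ : ∃ p ∈ nxt.items, p.1 = x := by
    simpa [PySem.Dict.keys, List.mem_map] using hxk
  obtain ⟨k, hk1, hkv⟩ := hitems p hp
  have hgetD : nxt.getD x 0 = p.2 := by
    have hmem : (x, p.2) ∈ nxt.items := by rw [← hpx]; exact hp
    exact PySem.Dict.getD_of_mem_items nxt hmem hnd 0
  rw [hpx] at hkv
  have hdiv : PySem.Int.floordiv (k * x) x = k := by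
    rw [PySem.Int.floordiv_eq_ediv_of_pos hxpos]
    exact Int.mul_ediv_cancel k (ne_of_gt hxpos)
  rw [hgetD, hkv, hdiv]
  have hlt : y < k * x := lt_of_lt_of_le hy (hkv ▸ hmin p hp)
  have := (PySem.Int.floordiv_lt_iff_lt_mul (a := y) (q := k) hxpos).mpr hlt
  omega

-- B's simulation loop returns the least feasible time (invariant-based characterization)
theorem simB_spec (n : Int) (times : List Int) (hpos : ∀ t ∈ times, 0 < t)
    (hne : times ≠ []) :
    ∀ (f : Nat) (nxt : PySem.Dict Int Int) (served ans : Int),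
      n - served < (f : Int) →
      nxt.keys = PySem.Set.ofList times →
      nxt.keys.Nodup →
      (∀ p ∈ nxt.items, ∃ k : Int, 1 ≤ k ∧ p.2 = k * p.1 ∧ (k - 1) * p.1 ≤ ans ∧ ans ≤ k * p.1) →
      served = (times.map (fun t => PySem.Int.floordiv (nxt.getD t 0) t - 1)).sum →
      0 ≤ ans →
      (∀ y, 0 ≤ y → y < ans → pvS times y < n) →
      0 ≤ simB (PySem.Dict.counter times) n f nxt served ans ∧
      n ≤ pvS times (simB (PySem.Dict.counter times) n f nxt served ans) ∧
      (∀ y, 0 ≤ y → y < simB (PySem.Dict.counter times) n f nxt served ans → ¬ n ≤ pvS times y) := by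
  intro f
  induction f with
  | zero =>
    intro nxt served ans hf hkeys hnd hitems hserved hans hmin
    have hns : n ≤ served := by push_cast at hf; omega
    simp only [simB]
    refine ⟨hans, ?_, fun y h1 h2 hy => by have := hmin y h1 h2; omega⟩
    have := served_le_pvS times hpos nxt ans hkeys hnd hitems
    omega
  | succ f ih =>
    intro nxt served ans hf hkeys hnd hitems hserved hans hmin
    simp only [simB]
    by_cases hlt : served < n
    · rw [if_pos hlt]
      have hitems_ne : nxt.items ≠ [] := by
        intro h0
        obtain ⟨t0, ht0⟩ := List.exists_mem_of_ne_nil times hne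
        have ht0' : t0 ∈ nxt.keys := by
          rw [hkeys]; exact (PySem.Set.mem_ofList times t0).mpr ht0
        simp [PySem.Dict.keys, h0] at ht0'
      cases hmv : PySem.List.min? nxt.items (fun p => p.2) with
      | none => exact absurd ((PySem.List.min?_eq_none_iff _ _).mp hmv) hitems_ne
      | some pr =>
        obtain ⟨t, v⟩ := pr
        have hpmem : (t, v) ∈ nxt.items := PySem.List.min?_mem hmv
        have hmins : ∀ q ∈ nxt.items, v ≤ q.2 := PySem.List.min?_isMin hmv
        have ht_keys : t ∈ nxt.keys := PySem.Dict.mem_keys_of_mem_items nxt hpmem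
        have ht_times : t ∈ times := by
          rw [hkeys] at ht_keys; exact (PySem.Set.mem_ofList times t).mp ht_keys
        have htpos : 0 < t := hpos t ht_times
        obtain ⟨k, hk1, hkv, hkle, hkge⟩ := hitems (t, v) hpmem
        simp only at hkv hkle hkge
        have hvt : v ≤ k * t := le_of_eq hkv
        have hgetD : nxt.getD t 0 = v := PySem.Dict.getD_of_mem_items nxt hpmem hnd 0
        have hcnt : (PySem.Dict.counter times).getD t 0 = (times.count t : Int) :=
          PySem.Dict.getD_counter times t
        have hcpos : 0 < times.count t := List.count_pos_iff.mpr ht_times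
        have hcontains : nxt.contains t = true := (PySem.Dict.contains_iff_mem_keys nxt t).mpr ht_keys
        -- the new served equation, via sum_map_split
        have hsum : (times.map (fun x => PySem.Int.floordiv ((nxt.insert t (v + t)).getD x 0) x - 1)).sum
            = (times.map (fun x => PySem.Int.floordiv (nxt.getD x 0) x - 1)).sum + (times.count t : Int) := by
          apply sum_map_split
          intro x hx
          rw [PySem.Dict.getD_insert]
          by_cases hxt : x = t
          · subst hxt
            have hxpos : 0 < x := hpos x hx
            rw [if_pos rfl, if_pos rfl, hgetD, hkv]
            have h1 : PySem.Int.floordiv (k * x + x) x = k + 1 := by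
              rw [PySem.Int.floordiv_eq_ediv_of_pos hxpos]
              have hx2 : k * x + x = (k + 1) * x := by ring
              rw [hx2]
              exact Int.mul_ediv_cancel (k + 1) (ne_of_gt hxpos)
            have h2 : PySem.Int.floordiv (k * x) x = k := by
              rw [PySem.Int.floordiv_eq_ediv_of_pos hxpos]
              exact Int.mul_ediv_cancel k (ne_of_gt hxpos)
            rw [h1, h2]; ring
          · rw [if_neg hxt, if_neg hxt]; ring
        apply ih (nxt.insert t (v + t)) (served + (PySem.Dict.counter times).getD t 0) v
        · -- fuel: each pop serves at least one applicant
          rw [hcnt]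
          push_cast at hf ⊢
          have h1 : (1 : Int) ≤ (times.count t : Int) := by exact_mod_cast hcpos
          omega
        · exact (PySem.Dict.keys_insert_of_contains nxt (v + t) hcontains).trans hkeys
        · exact PySem.Dict.nodup_keys_insert nxt t (v + t) hnd
        · -- per-item invariant with the new accumulator v
          intro q hq
          rcases (PySem.Dict.mem_items_insert nxt t (v + t) q).mp hq with hq1 | ⟨hq2, hq3⟩
          · subst hq1
            refine ⟨k + 1, by omega, ?_, ?_, ?_⟩
            · show v + t = (k + 1) * t
              rw [hkv]; ring
            · show (k + 1 - 1) * t ≤ v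
              rw [hkv]; nlinarith
            · show v ≤ (k + 1) * t
              rw [hkv]; nlinarith
          · obtain ⟨k', hk1', hkv', hle', hge'⟩ := hitems q hq2
            have hqv : v ≤ q.2 := hmins q hq2
            refine ⟨k', hk1', hkv', ?_, hkv' ▸ hqv⟩
            have hav : ans ≤ v := by rw [hkv]; exact hkge
            exact le_trans hle' hav
        · rw [hcnt, hsum, hserved]
        · nlinarith
        · -- minimality: any 0 ≤ y < v screens at most 'served' < n applicants
          intro y h1 h2
          have hitems' : ∀ p ∈ nxt.items, ∃ k : Int, 1 ≤ k ∧ p.2 = k * p.1 := by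
            intro p hp
            obtain ⟨k0, a1, a2, _, _⟩ := hitems p hp
            exact ⟨k0, a1, a2⟩
          have := pvS_le_served times hpos nxt y v hkeys hnd hitems' hmins h2
          omega
    · rw [if_neg hlt]
      have hns : n ≤ served := by omega
      refine ⟨hans, ?_, fun y h1 h2 hy => by have := hmin y h1 h2; omega⟩
      have := served_le_pvS times hpos nxt ans hkeys hnd hitems
      omega

-- one-step unfoldings of A's loops (variable fuel, so they do not unfold further)
theorem doubleA_stop (n : Int) (times : List Int) (f : Nat) (a b : Int)
    (h : isOk n times b = true) : doubleA n times (f + 1) a b = (a, b) := by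
  simp only [doubleA, h, if_true]

theorem searchA_left (n : Int) (times : List Int) (f : Nat) (a b : Int) (h1 : a < b)
    (h2 : isOk n times (PySem.Int.floordiv (a + b) 2) = true) :
    searchA n times (f + 1) a b = searchA n times f a (PySem.Int.floordiv (a + b) 2) := by
  simp only [searchA, if_pos h1, h2, if_true]

theorem searchA_stop (n : Int) (times : List Int) (f : Nat) (a b : Int) (h : ¬ a < b) :
    searchA n times (f + 1) a b = a := by
  simp only [searchA, if_neg h]

-- ===== VERDICT (by name: the statement is the Claim_ definition above) =====
theorem solution_spec : Claim_equal_solution := by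
  intro n times hdom hpre
  unfold Spec_solution
  rcases hpre with ⟨hpos, hemp⟩ | ⟨hnz, hneg⟩
  · -- Dom bounds
    have hnbound : n ≤ 2147483648 := by
      simp only [Dom_solution, Bool.and_eq_true, pvDomInt, decide_eq_true_eq] at hdom
      exact hdom.1.2
    have htbound : ∀ t ∈ times, t ≤ 2147483648 := by
      intro t ht
      simp only [Dom_solution, Bool.and_eq_true, List.all_eq_true, pvDomInt,
        decide_eq_true_eq] at hdom
      exact (hdom.2 t ht).2
    -- A's doubling phase reaches a feasible upper bound within 2^100
    have hPbig : n ≤ pvS times (2 ^ 100 * 1) := by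
      by_cases hn : 0 < n
      · have hne : times ≠ [] := fun h => absurd (hemp h) (by omega)
        obtain ⟨t0, ht0⟩ := List.exists_mem_of_ne_nil times hne
        have ht0pos : 0 < t0 := hpos t0 ht0
        have hmul : n * t0 ≤ 2 ^ 100 * 1 := by
          have h1 : n * t0 ≤ 2147483648 * t0 :=
            mul_le_mul_of_nonneg_right hnbound (by omega)
          have h2 : (2147483648 : Int) * t0 ≤ 2147483648 * 2147483648 :=
            mul_le_mul_of_nonneg_left (htbound t0 ht0) (by norm_num)
          have h3 : (2147483648 : Int) * 2147483648 ≤ 2 ^ 100 * 1 := by norm_num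
          omega
        have := (PySem.Int.le_floordiv_iff_mul_le (q := n) (a := 2 ^ 100 * 1) ht0pos).mpr hmul
        exact le_trans this (pvS_ge_mem times hpos ht0 (by norm_num))
      · have h0 : pvS times 0 = 0 := pvS_zero times (fun t ht => ne_of_gt (hpos t ht))
        have := pvS_mono times hpos (show (0:Int) ≤ 2 ^ 100 * 1 by norm_num)
        omega
    have hdbl := doubleA_spec n times hpos 100 0 1 (by omega) (by omega) (by omega)
      hPbig (fun y h1 h2 => by omega)
    unfold solution
    set p := doubleA n times 100 0 1 with hp
    have hgapA : p.2 - p.1 < 2 ^ 200 := by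
      have h1 : (2:Int) ^ 100 * 1 < 2 ^ 200 := by norm_num
      omega
    have hA := searchA_spec n times hpos 200 p.1 p.2 hgapA hdbl.2.1 hdbl.2.2.2.1
    have hAleast : 0 ≤ searchA n times 200 p.1 p.2 ∧ n ≤ pvS times (searchA n times 200 p.1 p.2) ∧
        ∀ y, 0 ≤ y → y < searchA n times 200 p.1 p.2 → ¬ n ≤ pvS times y := by
      refine ⟨by omega, hA.2.2.1, ?_⟩
      intro y h1 h2
      by_cases hy : y < p.1
      · exact hdbl.2.2.2.2 y h1 hy
      · exact hA.2.2.2 y (by omega) h2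
    -- B's side
    simp only [solution_alt]
    rw [PySem.Dict.foldl_insert_getD_add_one_eq_counter]
    by_cases hne : times = []
    · -- empty times: Pre_ gives n ≤ 0, the loop is not entered and B returns 0
      subst hne
      have hn0 : n ≤ 0 := hemp rfl
      rw [Int.toNat_of_nonpos hn0]
      have hB0 : simB (PySem.Dict.counter []) n (0 + 1)
          ((PySem.Dict.counter ([] : List Int)).keys.foldl (fun d t => d.insert t t) PySem.Dict.empty) 0 0 = 0 := by
        simp only [simB, if_neg (by omega : ¬ (0:Int) < n)]
      rw [hB0]
      refine least_unique n [] hAleast ⟨le_refl 0, ?_, fun y h1 h2 => by omega⟩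
      simp only [pvS, List.map_nil, List.sum_nil]
      omega
    · -- nonempty times: the simulation invariant applies from the initial state
      have hknd : (PySem.Dict.counter times).keys.Nodup := PySem.Dict.nodup_keys_counter times
      have hkc : (PySem.Dict.counter times).keys = PySem.Set.ofList times :=
        PySem.Dict.keys_counter times
      set nxt0 := (PySem.Dict.counter times).keys.foldl (fun d t => d.insert t t) PySem.Dict.empty with hnxt0
      have hit0 : nxt0.items = (PySem.Dict.counter times).keys.map (fun t => (t, t)) := by
        have h := PySem.Dict.items_foldl_insert_fresh ((PySem.Dict.counter times).keys)
          (fun t => t) (fun t => t) PySem.Dict.empty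
          (fun a _ => PySem.Dict.contains_empty a) (by simpa using hknd)
        rw [hnxt0]
        exact h
      have hkeys0 : nxt0.keys = PySem.Set.ofList times := by
        rw [← hkc]
        simp [PySem.Dict.keys, hit0, List.map_map, Function.comp]
      have hnd0 : nxt0.keys.Nodup := by rw [hkeys0]; exact PySem.Set.nodup_ofList times
      have hmem0 : ∀ x ∈ times, (x, x) ∈ nxt0.items := by
        intro x hx
        rw [hit0]
        exact List.mem_map_of_mem (by rw [hkc]; exact (PySem.Set.mem_ofList times x).mpr hx)
      have hgetD0 : ∀ x ∈ times, nxt0.getD x 0 = x := by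
        intro x hx
        exact PySem.Dict.getD_of_mem_items nxt0 (hmem0 x hx) hnd0 0
      have hB := simB_spec n times hpos hne (n.toNat + 1) nxt0 0 0
        (by push_cast; have := Int.self_le_toNat n; omega)
        hkeys0 hnd0
        (by
          intro q hq
          rw [hit0] at hq
          obtain ⟨x, hx, rfl⟩ := List.mem_map.mp hq
          have hxt : x ∈ times := by
            rw [hkc] at hx; exact (PySem.Set.mem_ofList times x).mp hx
          have hxpos : 0 < x := hpos x hxt
          exact ⟨1, le_refl 1, by simp, by simp, by simpa using le_of_lt hxpos⟩)
        (by
          symm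
          apply List.sum_eq_zero
          intro y hy
          obtain ⟨x, hx, rfl⟩ := List.mem_map.mp hy
          rw [hgetD0 x hx]
          have hxpos : 0 < x := hpos x hx
          rw [PySem.Int.floordiv_eq_ediv_of_pos hxpos, Int.ediv_self (ne_of_gt hxpos)]
          ring)
        (le_refl 0)
        (fun y h1 h2 => by omega)
      exact least_unique n times hAleast ⟨hB.1, hB.2.1, hB.2.2⟩
  · -- degenerate corner n ≤ -len(times): A's first test succeeds at once, both return 0
    have hlen0 : (0:Int) ≤ (times.length : Int) := by positivity
    have hn0 : n ≤ 0 := by omega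
    have hok1 : isOk n times 1 = true := by
      simp only [isOk, decide_eq_true_eq]
      exact le_trans hneg (sum_floordiv_one_ge times hnz)
    have hok0 : isOk n times 0 = true := by
      simp only [isOk, decide_eq_true_eq]
      have h0 := pvS_zero times hnz
      unfold pvS at h0
      omega
    have hd : doubleA n times 100 0 1 = (0, 1) := doubleA_stop n times 99 0 1 hok1
    have hm : PySem.Int.floordiv (0 + 1) 2 = 0 := by decide
    have hok0' : isOk n times (PySem.Int.floordiv (0 + 1) 2) = true := by rw [hm]; exact hok0
    have hs : searchA n times 200 0 1 = 0 := by
      have e1 := searchA_left n times 199 0 1 (by norm_num) hok0'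
      have e2 : searchA n times 199 0 0 = 0 := searchA_stop n times 198 0 0 (lt_irrefl 0)
      rw [hm] at e1
      exact e1.trans e2
    have hA0 : solution n times = 0 := by
      show searchA n times 200 (doubleA n times 100 0 1).1 (doubleA n times 100 0 1).2 = 0
      rw [hd]
      exact hs
    have hB1 : solution_alt n times = 0 := by
      simp only [solution_alt]
      rw [Int.toNat_of_nonpos hn0]
      simp only [simB]
      rw [if_neg (by omega : ¬ (0:Int) < n)]
    rw [hA0, hB1]
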